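-- pv_equiv track=rewrite | github.com/JKair/-LeetCodeSolution | 2.Medium/Repeated DNA Sequences.py | tezhengma
-- ===== SOURCE A (Python) =====
-- def tezhengma(s):
--     res = 0
--     for x in s:
--         if x == 'A':
--             res = res + 0
--         elif x == 'C':
--             res = res + 1
--         elif x == 'G':
--             res = res + 2
--         elif x == 'T':
--             res = res + 3
--         res = res<<3
--     return res
-- ===== SOURCE B (Python) =====
-- def tezhengma(s):
--     code = {'A': 0, 'C': 1, 'G': 2, 'T': 3}
--     n = len(s)
--     return sum(code.get(c, 0) << (3 * (n - i)) for i, c in enumerate(s))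
-- ===== Notes on version B (the rewrite author's own statement) =====
-- stated objective: simpler
-- what changed: Replaces the Horner-style accumulator (add the character's code, then shift the whole accumulator left by 3 each iteration) by direct polynomial evaluation: a dict maps each base to its code and the result is a single weighted sum with per-position shift 3*(n-i).
import Mathlib
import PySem

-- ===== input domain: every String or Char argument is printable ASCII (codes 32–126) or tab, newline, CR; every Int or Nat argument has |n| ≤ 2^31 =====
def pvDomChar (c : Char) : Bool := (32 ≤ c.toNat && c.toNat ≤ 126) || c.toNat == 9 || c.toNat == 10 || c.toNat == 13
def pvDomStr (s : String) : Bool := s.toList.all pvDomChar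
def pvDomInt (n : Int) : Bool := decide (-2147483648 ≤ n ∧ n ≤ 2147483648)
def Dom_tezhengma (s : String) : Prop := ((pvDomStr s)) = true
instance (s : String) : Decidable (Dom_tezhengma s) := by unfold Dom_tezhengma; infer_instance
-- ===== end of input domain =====

-- B replaces A's Horner accumulation (add code, shift accumulator by 3 each step) by a direct
-- weighted sum: dict code lookup times a per-position power 2^(3*(n-i)); objective: simpler.


-- ===== PORT A =====
def tezhengma (s : String) : Int :=
  s.toList.foldl (fun res x =>
    (if x = 'A' then res + 0
     else if x = 'C' then res + 1
     else if x = 'G' then res + 2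
     else if x = 'T' then res + 3
     else res) <<< (3 : Nat)) 0

-- ===== PORT B =====
-- Source B's dict {'A':0,'C':1,'G':2,'T':3}
def pvCode : PySem.Dict Char Int :=
  PySem.Dict.ofList [('A', 0), ('C', 1), ('G', 2), ('T', 3)]

def tezhengma_alt (s : String) : Int :=
  ((PySem.List.enumerate s.toList 0).map
    (fun p => (pvCode.getD p.2 0) <<< (3 * (s.toList.length - p.1.toNat)))).sum

-- ===== PRECONDITION & SPEC =====
def Spec_tezhengma (s : String) (out : Int) : Prop := out = tezhengma_alt s
instance (s : String) (out : Int) : Decidable (Spec_tezhengma s out) := by unfold Spec_tezhengma; infer_instance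

-- ===== CLAIM (what is proved, stated in full; the proofs are below) =====
def Claim_equal_tezhengma : Prop := ∀ (s : String), Dom_tezhengma s → Spec_tezhengma s (tezhengma s)

-- ===== LEMMAS AND PROOFS =====

-- A's loop body adds exactly the dict code of the character (0 for non-ACGT).
theorem pvStep_eq (res : Int) (x : Char) :
    (if x = 'A' then res + 0
     else if x = 'C' then res + 1
     else if x = 'G' then res + 2
     else if x = 'T' then res + 3
     else res) = res + pvCode.getD x 0 := by
  have hit : pvCode.items = [('A', 0), ('C', 1), ('G', 2), ('T', 3)] := by decide
  split_ifs with h1 h2 h3 h4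
  · subst h1; rw [show pvCode.getD 'A' 0 = (0 : Int) from by decide]
  · subst h2; rw [show pvCode.getD 'C' 0 = (1 : Int) from by decide]
  · subst h3; rw [show pvCode.getD 'G' 0 = (2 : Int) from by decide]
  · subst h4; rw [show pvCode.getD 'T' 0 = (3 : Int) from by decide]
  · have n1 : ('A' : Char) ≠ x := fun h => h1 h.symm
    have n2 : ('C' : Char) ≠ x := fun h => h2 h.symm
    have n3 : ('G' : Char) ≠ x := fun h => h3 h.symm
    have n4 : ('T' : Char) ≠ x := fun h => h4 h.symm
    have b1 : ('A' == x) = false := by simp [n1]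
    have b2 : ('C' == x) = false := by simp [n2]
    have b3 : ('G' == x) = false := by simp [n3]
    have b4 : ('T' == x) = false := by simp [n4]
    simp [PySem.Dict.getD, PySem.Dict.get?, hit, List.find?, b1, b2, b3, b4]

theorem pvShift_eq (a : Int) (k : Nat) : a <<< k = a * 2 ^ k := Int.shiftLeft_eq a k

-- loop invariant: folding A's step from acc over l equals acc scaled plus B's weighted sum over l
theorem pvKey (l : List Char) (acc : Int) (s : Nat) :
    l.foldl (fun (res : Int) (x : Char) =>
      (if x = 'A' then res + 0
       else if x = 'C' then res + 1
       else if x = 'G' then res + 2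
       else if x = 'T' then res + 3
       else res) <<< (3 : Nat)) acc
    = acc * 8 ^ l.length +
      ((PySem.List.enumerate l (s : Int)).map
        (fun p => (pvCode.getD p.2 0) <<< (3 * ((s + l.length) - p.1.toNat)))).sum := by
  induction l generalizing acc s with
  | nil => simp [PySem.List.enumerate_nil]
  | cons c t ih =>
    rw [List.foldl_cons, PySem.List.enumerate_cons]
    have h1 : ((s : Int) + 1) = ((s + 1 : Nat) : Int) := by push_cast; ring
    rw [List.map_cons, List.sum_cons, h1, ih _ (s + 1)]
    rw [pvStep_eq, pvShift_eq]
    simp only [List.length_cons, Int.toNat_natCast]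
    rw [show s + (t.length + 1) - s = t.length + 1 from by omega, pvShift_eq]
    have hw : ∀ (p : Int × Char),
        (s + 1) + t.length - p.1.toNat = s + (t.length + 1) - p.1.toNat := by
      intro p; omega
    have hmap : ((PySem.List.enumerate t ((s + 1 : Nat) : Int)).map
        (fun p => (pvCode.getD p.2 0) <<< (3 * ((s + 1) + t.length - p.1.toNat)))).sum
      = ((PySem.List.enumerate t ((s + 1 : Nat) : Int)).map
        (fun p => (pvCode.getD p.2 0) <<< (3 * (s + (t.length + 1) - p.1.toNat)))).sum := by
      congr 1; apply List.map_congr_left; intro p _; rw [hw p]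
    rw [hmap]
    have h8 : (2 : Int) ^ (3 * (t.length + 1)) = 8 ^ (t.length + 1) := by
      rw [pow_mul]; norm_num
    rw [h8]
    ring

-- ===== VERDICT (by name: the statement is the Claim_ definition above) =====
theorem tezhengma_spec : Claim_equal_tezhengma := by
  intro s _
  unfold Spec_tezhengma tezhengma tezhengma_alt
  have := pvKey s.toList 0 0
  simpa using this
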